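-- pv_equiv track=rewrite | github.com/Leandrigues/code-interview | stockAccumulation.py | stocks_diff
-- ===== SOURCE A (Python) =====
-- def stocks_diff(arr):
--     stocks_diff = []
--
--     for company_stock in arr:
--         current_diff = []
--         previous_price = 0
--         for (_, current_price) in company_stock:
--             current_diff.append(current_price - previous_price)
--             previous_price = current_price
--         stocks_diff.append(current_diff)
--
--     return stocks_diff
-- ===== SOURCE B (Python) =====
-- def rest_diffs(prev, rows):
--     if not rows:
--         return []
--     (_, p) = rows[0]
--     return [p - prev] + rest_diffs(p, rows[1:])
--
-- def company_diffs(rows):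
--     if not rows:
--         return []
--     (_, p) = rows[0]
--     return [p] + rest_diffs(p, rows[1:])
--
-- def stocks_diff(arr):
--     if not arr:
--         return []
--     return [company_diffs(arr[0])] + stocks_diff(arr[1:])
-- ===== Notes on version B (the rewrite author's own statement) =====
-- stated objective: alternative
-- what changed: Replaced A's iterative 0-seeded accumulator loops by structural recursion: the outer list is consumed recursively, and per company the first price is emitted directly (no zero seed) while the remaining diffs are produced by a recursive helper threading the previous price.
import Mathlib
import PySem

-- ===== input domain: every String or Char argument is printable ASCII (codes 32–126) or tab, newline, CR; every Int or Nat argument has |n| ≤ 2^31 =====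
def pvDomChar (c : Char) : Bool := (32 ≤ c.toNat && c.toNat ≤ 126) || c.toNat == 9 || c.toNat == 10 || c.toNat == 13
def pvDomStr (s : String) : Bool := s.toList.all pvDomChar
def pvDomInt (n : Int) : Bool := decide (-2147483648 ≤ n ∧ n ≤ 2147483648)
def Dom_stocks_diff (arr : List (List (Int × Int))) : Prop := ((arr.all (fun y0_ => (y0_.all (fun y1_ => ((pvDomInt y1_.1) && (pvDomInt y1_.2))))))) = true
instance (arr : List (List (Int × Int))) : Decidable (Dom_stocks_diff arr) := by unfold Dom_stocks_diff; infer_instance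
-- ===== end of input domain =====

-- B recasts A's iterative 0-seeded accumulator loops as structural recursion with the
-- first price emitted directly (objective: alternative decomposition, same cost).

-- ===== PORT A =====
-- inner loop of A: fold threading (current_diff, previous_price)
def stocks_diff (arr : List (List (Int × Int))) : List (List Int) :=
  arr.foldl (fun sd company_stock =>
    let p := company_stock.foldl
      (fun (st : List Int × Int) row =>
        (st.1 ++ [row.2 - st.2], row.2)) ([], 0)
    sd ++ [p.1]) []

-- ===== PORT B =====
def rest_diffs (prev : Int) (rows : List (Int × Int)) : List Int :=
  match rows with
  | [] => []
  | r :: rest => [r.2 - prev] ++ rest_diffs r.2 rest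

def company_diffs (rows : List (Int × Int)) : List Int :=
  match rows with
  | [] => []
  | r :: rest => [r.2] ++ rest_diffs r.2 rest

def stocks_diff_alt (arr : List (List (Int × Int))) : List (List Int) :=
  match arr with
  | [] => []
  | c :: rest => [company_diffs c] ++ stocks_diff_alt rest

-- ===== PRECONDITION & SPEC =====
def Spec_stocks_diff (arr : List (List (Int × Int))) (out : List (List Int)) : Prop := out = stocks_diff_alt arr
instance (arr : List (List (Int × Int))) (out : List (List Int)) : Decidable (Spec_stocks_diff arr out) := by unfold Spec_stocks_diff; infer_instance

-- ===== CLAIM =====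
def Claim_equal_stocks_diff : Prop := ∀ (arr : List (List (Int × Int))), Dom_stocks_diff arr → Spec_stocks_diff arr (stocks_diff arr)

-- ===== LEMMAS AND PROOFS =====

-- A's inner fold from accumulator (acc, prev) appends exactly rest_diffs prev rows.
theorem inner_fold_eq (rows : List (Int × Int)) (acc : List Int) (prev : Int) :
    (rows.foldl (fun (st : List Int × Int) row => (st.1 ++ [row.2 - st.2], row.2)) (acc, prev)).1
      = acc ++ rest_diffs prev rows := by
  induction rows generalizing acc prev with
  | nil => simp [rest_diffs]
  | cons h t ih => simp [rest_diffs, ih]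

-- seeded with prev = 0, the inner loop's diffs are company_diffs
theorem inner_eq_company (rows : List (Int × Int)) :
    (rows.foldl (fun (st : List Int × Int) row => (st.1 ++ [row.2 - st.2], row.2)) ([], 0)).1
      = company_diffs rows := by
  cases rows with
  | nil => simp [company_diffs]
  | cons h t => simp [inner_fold_eq, rest_diffs, company_diffs]

-- A's outer fold from accumulator l appends one company_diffs per company.
theorem outer_fold_eq (arr : List (List (Int × Int))) (l : List (List Int)) :
    arr.foldl (fun sd company_stock =>
      let p := company_stock.foldl
        (fun (st : List Int × Int) row => (st.1 ++ [row.2 - st.2], row.2)) ([], 0)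
      sd ++ [p.1]) l = l ++ stocks_diff_alt arr := by
  induction arr generalizing l with
  | nil => simp [stocks_diff_alt]
  | cons h t ih =>
      simp only [List.foldl_cons]
      rw [ih, inner_eq_company]
      simp [stocks_diff_alt]

-- ===== VERDICT =====
theorem stocks_diff_spec : Claim_equal_stocks_diff := by
  intro arr _
  unfold Spec_stocks_diff stocks_diff
  simpa using outer_fold_eq arr []
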